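-- pv_equiv track=rewrite | github.com/ParveendThakur/Last-Start-CODING-From-ZERO-Learning-from-Masai | Sprint Evaluation-1 (PBS-201)/Bucket Of Water.py | cpw
-- ===== SOURCE A (Python) =====
-- def cpw(N, a, b):
--     tw = sum(a)
--     tc = sum(b)
--     mc = max(b)
--
--     if tw <= tc:
--         return "Yes"
--     if tw > mc:
--         return "No"
--
--     count = 0
--
--     for i in range (N):
--         if b[i] - a[i] >= tw - mc:
--             count += 1
--             if count == 2:
--                 return "Yes"
--     return "No"
-- ===== SOURCE B (Python) =====
-- def cpw(N, a, b):
--     tw = sum(a)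
--     tc = sum(b)
--     mc = max(b)
--
--     if tw <= tc:
--         return "Yes"
--     if tw > mc:
--         return "No"
--
--     d = sorted((b[i] - a[i] for i in range(N)), reverse=True)
--     return "Yes" if len(d) >= 2 and d[1] >= tw - mc else "No"
-- ===== Notes on version B (the rewrite author's own statement) =====
-- stated objective: alternative
-- what changed: The early-exit counting loop over indices is replaced by building the difference list, sorting it in descending order and testing whether the second-largest difference reaches the threshold.
-- outside the precondition, e.g. on cpw(4, [2, 2, 2], [10, 9, -15]): A returns 'Yes', B raises IndexError
import Mathlib
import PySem

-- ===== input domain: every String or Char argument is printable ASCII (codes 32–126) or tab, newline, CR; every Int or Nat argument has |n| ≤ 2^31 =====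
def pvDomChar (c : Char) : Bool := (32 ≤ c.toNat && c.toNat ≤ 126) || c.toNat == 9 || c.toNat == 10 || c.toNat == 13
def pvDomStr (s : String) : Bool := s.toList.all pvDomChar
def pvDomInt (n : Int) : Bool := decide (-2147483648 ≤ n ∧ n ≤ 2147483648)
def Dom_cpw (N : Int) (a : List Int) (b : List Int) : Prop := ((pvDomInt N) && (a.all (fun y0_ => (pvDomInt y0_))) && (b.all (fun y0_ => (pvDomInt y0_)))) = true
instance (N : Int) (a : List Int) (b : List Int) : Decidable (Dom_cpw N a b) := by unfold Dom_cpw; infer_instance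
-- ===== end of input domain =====

-- B replaces A's early-exit counting scan by a sort of the difference list and a test of
-- its second-largest element (objective: alternative decomposition, same result).

-- ===== PORT A =====
-- the counting loop; "No" in the index-lookup mismatch arm is Python's IndexError (excluded by Pre_)
def cpwLoop (a b : List Int) (t : Int) : List Int → Int → String
  | [], _ => "No"
  | i :: rest, count =>
    match PySem.List.pyGet? b i, PySem.List.pyGet? a i with
    | some bi, some ai =>
      if t ≤ bi - ai then
        if count + 1 = 2 then "Yes" else cpwLoop a b t rest (count + 1)
      else cpwLoop a b t rest count
    | _, _ => "No"

def cpw (N : Int) (a : List Int) (b : List Int) : String :=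
  let tw := a.sum
  let tc := b.sum
  match PySem.List.max? b (fun x => x) with
  | none => "No"   -- max([]) raises ValueError; excluded by Pre_
  | some mc =>
    if tw ≤ tc then "Yes"
    else if mc < tw then "No"
    else cpwLoop a b (tw - mc) (PySem.List.pyRange 0 N 1) 0

-- ===== PORT B =====
-- the generator (b[i] - a[i] for i in range(N)): none = IndexError (excluded by Pre_)
def cpwDiffs? (a b : List Int) : List Int → Option (List Int)
  | [] => some []
  | i :: rest =>
    match PySem.List.pyGet? b i, PySem.List.pyGet? a i with
    | some bi, some ai => (cpwDiffs? a b rest).map (fun ds => (bi - ai) :: ds)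
    | _, _ => none

def cpw_alt (N : Int) (a : List Int) (b : List Int) : String :=
  let tw := a.sum
  let tc := b.sum
  match PySem.List.max? b (fun x => x) with
  | none => "No"   -- max([]) raises ValueError; excluded by Pre_
  | some mc =>
    if tw ≤ tc then "Yes"
    else if mc < tw then "No"
    else
      match cpwDiffs? a b (PySem.List.pyRange 0 N 1) with
      | none => "No"
      | some ds =>
        match PySem.List.sorted ds (fun x => x) true with
        | _ :: d1 :: _ => if tw - mc ≤ d1 then "Yes" else "No"
        | _ => "No"

-- ===== PRECONDITION & SPEC =====
-- Pre_ excludes b = [] (max([]) raises ValueError) and, when the loop is reached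
-- (sum(b) < sum(a) ≤ max(b)), an N larger than a length (A may return "Yes" before the
-- IndexError while B's full comprehension raises; both raise when no second hit occurs early).
def Pre_cpw (N : Int) (a : List Int) (b : List Int) : Prop :=
  b ≠ [] ∧ (b.sum < a.sum ∧ a.sum ≤ (PySem.List.max? b (fun x => x)).getD 0 →
    N ≤ (a.length : Int) ∧ N ≤ (b.length : Int))
instance (N : Int) (a : List Int) (b : List Int) : Decidable (Pre_cpw N a b) := by unfold Pre_cpw; infer_instance

def pvWitness_cpw : Int × List Int × List Int := (2, [3, 4], [5, 1])

def Spec_cpw (N : Int) (a : List Int) (b : List Int) (out : String) : Prop := out = cpw_alt N a b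
instance (N : Int) (a : List Int) (b : List Int) (out : String) : Decidable (Spec_cpw N a b out) := by unfold Spec_cpw; infer_instance

-- ===== CLAIM (what is proved, stated in full; the proofs are below) =====
def Claim_equal_cpw : Prop := ∀ (N : Int) (a : List Int) (b : List Int), Dom_cpw N a b → Pre_cpw N a b → Spec_cpw N a b (cpw N a b)

-- ===== LEMMAS AND PROOFS =====

-- If every index resolves, the comprehension succeeds with the mapped differences.
theorem cpwDiffs?_eq_map (a b : List Int) (idxs : List Int)
    (h : ∀ i ∈ idxs, 0 ≤ i ∧ i < (a.length : Int) ∧ i < (b.length : Int)) :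
    cpwDiffs? a b idxs =
      some (idxs.map (fun i => PySem.List.pyGetD b i 0 - PySem.List.pyGetD a i 0)) := by
  induction idxs with
  | nil => rfl
  | cons i rest ih =>
    obtain ⟨hi0, hia, hib⟩ := h i (by simp)
    rw [cpwDiffs?]
    rw [PySem.List.pyGet?_eq_some_getElem b hi0 hib,
        PySem.List.pyGet?_eq_some_getElem a hi0 hia,
        ih (fun j hj => h j (by simp [hj]))]
    simp [PySem.List.pyGetD_eq_getElem b 0 hi0 hib, PySem.List.pyGetD_eq_getElem a 0 hi0 hia]

-- A's loop returns "Yes" exactly when the count (starting at c ≤ 1) reaches 2.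
theorem cpwLoop_eq_count (a b : List Int) (t : Int) (idxs : List Int)
    (h : ∀ i ∈ idxs, 0 ≤ i ∧ i < (a.length : Int) ∧ i < (b.length : Int))
    (c : Int) (hc : c = 0 ∨ c = 1) :
    cpwLoop a b t idxs c =
      if 2 ≤ c + ((idxs.map (fun i => PySem.List.pyGetD b i 0 - PySem.List.pyGetD a i 0)).countP
          (fun x => decide (t ≤ x)) : Int) then "Yes" else "No" := by
  induction idxs generalizing c with
  | nil => simp [cpwLoop]; omega
  | cons i rest ih =>
    obtain ⟨hi0, hia, hib⟩ := h i (by simp)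
    have hrest : ∀ j ∈ rest, 0 ≤ j ∧ j < (a.length : Int) ∧ j < (b.length : Int) :=
      fun j hj => h j (by simp [hj])
    have hf : PySem.List.pyGetD b i 0 - PySem.List.pyGetD a i 0 = b[i.toNat] - a[i.toNat] := by
      rw [PySem.List.pyGetD_eq_getElem b 0 hi0 hib, PySem.List.pyGetD_eq_getElem a 0 hi0 hia]
    rw [cpwLoop]
    rw [PySem.List.pyGet?_eq_some_getElem b hi0 hib,
        PySem.List.pyGet?_eq_some_getElem a hi0 hia]
    show (if t ≤ b[i.toNat] - a[i.toNat] then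
        if c + 1 = 2 then "Yes" else cpwLoop a b t rest (c + 1)
      else cpwLoop a b t rest c) = _
    by_cases hp : t ≤ b[i.toNat] - a[i.toNat]
    · rw [if_pos hp]
      have hcnt : ((i :: rest).map (fun i => PySem.List.pyGetD b i 0 - PySem.List.pyGetD a i 0)).countP
          (fun x => decide (t ≤ x))
          = (rest.map (fun i => PySem.List.pyGetD b i 0 - PySem.List.pyGetD a i 0)).countP
            (fun x => decide (t ≤ x)) + 1 := by
        simp [hf, hp]
      rw [hcnt]
      by_cases h2 : c + 1 = 2
      · rw [if_pos h2, if_pos (by omega)]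
      · rw [if_neg h2, ih hrest (c + 1) (by omega)]
        exact if_congr (by omega) rfl rfl
    · rw [if_neg hp]
      have hcnt : ((i :: rest).map (fun i => PySem.List.pyGetD b i 0 - PySem.List.pyGetD a i 0)).countP
          (fun x => decide (t ≤ x))
          = (rest.map (fun i => PySem.List.pyGetD b i 0 - PySem.List.pyGetD a i 0)).countP
            (fun x => decide (t ≤ x)) := by
        simp [hf, hp]
      rw [hcnt, ih hrest c hc]

-- The second element of the descending sort is ≥ t iff at least two list elements are ≥ t.
theorem sorted_head2_iff (ds : List Int) (t : Int) :
    (match PySem.List.sorted ds (fun x => x) true with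
      | _ :: d1 :: _ => if t ≤ d1 then "Yes" else "No"
      | _ => "No") =
      if 2 ≤ (ds.countP (fun x => decide (t ≤ x)) : Int) then "Yes" else "No" := by
  have hperm := PySem.List.sorted_perm ds (fun x => x) true
  have hcount : (PySem.List.sorted ds (fun x => x) true).countP (fun x => decide (t ≤ x))
      = ds.countP (fun x => decide (t ≤ x)) := hperm.countP_eq _
  have hpw := PySem.List.sorted_pairwise_rev (xs := ds) (key := fun x => x)
  rcases hs : PySem.List.sorted ds (fun x => x) true with _ | ⟨d0, _ | ⟨d1, rest⟩⟩
  · rw [hs] at hcount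
    have h1 : ds.countP (fun x => decide (t ≤ x)) = 0 := by simp at hcount; omega
    show "No" = _
    rw [if_neg (by omega)]
  · rw [hs] at hcount
    have h1 : ds.countP (fun x => decide (t ≤ x)) ≤ 1 := by
      rw [← hcount]; simp [List.countP_cons]; split <;> omega
    show "No" = _
    rw [if_neg (by omega)]
  · rw [hs] at hcount hpw
    simp only [List.pairwise_cons] at hpw
    have h10 : d1 ≤ d0 := hpw.1 d1 (by simp)
    show (if t ≤ d1 then "Yes" else "No") = _
    by_cases ht : t ≤ d1
    · rw [if_pos ht]
      have h2 : 2 ≤ ds.countP (fun x => decide (t ≤ x)) := by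
        rw [← hcount]; simp [ht, le_trans ht h10]
      rw [if_pos (by omega)]
    · rw [if_neg ht]
      have hz : (d1 :: rest).countP (fun x => decide (t ≤ x)) = 0 := by
        rw [List.countP_eq_zero]
        intro x hx
        rcases List.mem_cons.mp hx with rfl | hx'
        · simpa using ht
        · have := hpw.2.1 x hx'
          simp only [decide_eq_true_eq]
          omega
      have h1 : ds.countP (fun x => decide (t ≤ x)) ≤ 1 := by
        rw [← hcount, List.countP_cons, hz]
        split <;> omega
      rw [if_neg (by omega)]

-- ===== VERDICT (by name: the statement is the Claim_ definition above) =====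
theorem cpw_spec : Claim_equal_cpw := by
  intro N a b _ hpre
  obtain ⟨hb, hlen⟩ := hpre
  show cpw N a b = cpw_alt N a b
  unfold cpw cpw_alt
  rcases hmax : PySem.List.max? b (fun x => x) with _ | mc
  · exact absurd ((PySem.List.max?_eq_none_iff b _).mp hmax) hb
  · simp only
    by_cases h1 : a.sum ≤ b.sum
    · simp [h1]
    · simp only [if_neg h1]
      by_cases h2 : mc < a.sum
      · simp [h2]
      · simp only [if_neg h2]
        have hN : N ≤ (a.length : Int) ∧ N ≤ (b.length : Int) := by
          apply hlen; rw [hmax]; simp only [Option.getD_some]; constructor <;> omega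
        have hall : ∀ i ∈ PySem.List.pyRange 0 N 1,
            0 ≤ i ∧ i < (a.length : Int) ∧ i < (b.length : Int) := by
          intro i hi
          rw [PySem.List.mem_pyRange_one] at hi
          exact ⟨hi.1, by omega, by omega⟩
        rw [cpwDiffs?_eq_map a b _ hall, cpwLoop_eq_count a b _ _ hall 0 (Or.inl rfl)]
        simp only
        rw [sorted_head2_iff]
        simp [List.countP_map, Function.comp_def]
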